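-- pv_equiv track=rewrite | github.com/leowcy/Algorithm | src/other/print-all-words.py | print_all_words
-- ===== SOURCE A (Python) =====
-- def print_all_words(input):
--     d = [[1,0], [-1, 0], [0, 1], [0, -1], [-1, 1], [-1, -1], [1, 1], [1, -1]]
--     row = len(input)
--     column = len(input[0])
--     ans = set()
--
--     def dfs(visited, path, x, y, ans):
--         path.append(input[x][y])
--         visited[x][y] = True
--         ans.add(''.join(path))
--
--         for dx, dy in d:
--             nx, ny = x + dx, y + dy
--             if 0 <= nx < len(input) and 0 <= ny < len(input[0]) and not visited[nx][ny]:
--                 dfs(visited, path, nx, ny, ans)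
--
--         path.pop()
--         visited[x][y] = False
--
--     visited = [[False for _ in range(column)] for _ in range(row)]
--
--     for i in range(row):
--         for j in range(column):
--             dfs(visited, [], i, j, ans)
--
--     return ans
-- ===== SOURCE B (Python) =====
-- def print_all_words(input):
--     # Explicit-stack DFS with per-frame immutable visited copies (no shared
--     # backtracking state). Neighbors are pushed in reversed direction order so
--     # the pop order matches the recursive DFS's direction order.
--     d = [(1, 0), (-1, 0), (0, 1), (0, -1), (-1, 1), (-1, -1), (1, 1), (1, -1)]
--     rows = len(input)
--     cols = len(input[0])
--     ans = set()
--     for i in range(rows):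
--         for j in range(cols):
--             visited0 = [[False] * cols for _ in range(rows)]
--             visited0[i][j] = True
--             stack = [(i, j, input[i][j], visited0)]
--             while stack:
--                 x, y, path, vis = stack.pop()
--                 ans.add(path)
--                 for dx, dy in reversed(d):
--                     nx, ny = x + dx, y + dy
--                     if 0 <= nx < rows and 0 <= ny < cols and not vis[nx][ny]:
--                         nvis = [row[:] for row in vis]
--                         nvis[nx][ny] = True
--                         stack.append((nx, ny, path + input[nx][ny], nvis))
--     return ans
-- ===== Notes on version B (the rewrite author's own statement) =====
-- stated objective: alternative
-- what changed: Replaces the recursive backtracking DFS (one shared visited matrix and path list, mutated and restored around every call) with an iterative explicit-stack traversal whose frames each carry the already-joined path string and their own immutable copy of the visited matrix, pushing neighbor frames in reversed direction order.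
-- outside the precondition, e.g. on print_all_words([]): A raises IndexError, B raises IndexError; on print_all_words([['a', 'b'], ['c']]): A raises IndexError, B raises IndexError
import Mathlib
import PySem

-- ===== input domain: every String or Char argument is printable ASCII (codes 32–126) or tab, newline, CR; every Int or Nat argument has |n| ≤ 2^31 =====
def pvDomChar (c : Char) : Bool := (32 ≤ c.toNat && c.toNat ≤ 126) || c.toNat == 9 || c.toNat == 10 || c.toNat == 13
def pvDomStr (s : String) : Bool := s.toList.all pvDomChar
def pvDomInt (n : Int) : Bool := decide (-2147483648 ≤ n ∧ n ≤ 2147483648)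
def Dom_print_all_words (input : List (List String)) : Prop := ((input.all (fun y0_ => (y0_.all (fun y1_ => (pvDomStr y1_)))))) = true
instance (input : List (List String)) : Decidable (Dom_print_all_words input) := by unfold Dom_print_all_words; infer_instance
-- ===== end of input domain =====

-- B replaces the recursive backtracking DFS (shared visited matrix and path list,
-- mutated and restored around every call) with an explicit stack of frames, each
-- holding the already-joined path string and its own copy of the visited matrix.
-- Objective: alternative (same asymptotic cost; no speed claim).

-- ===== PORT A =====
-- shared small helpers (both Pythons index the grid / a visited matrix the same way)
def pvDirs : List (Int × Int) := [(1,0), (-1,0), (0,1), (0,-1), (-1,1), (-1,-1), (1,1), (1,-1)]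

-- input[x][y]; exact wherever 0 ≤ x < len(input) and 0 ≤ y < len(input[x]) (true at every use under Pre_)
def pvCell (g : List (List String)) (x y : Int) : String :=
  (((PySem.List.pyGet? g x).bind (fun r => PySem.List.pyGet? r y)).getD "")

-- visited[x][y] as an Option; 'some false' ↔ in range and unvisited
def pvVisGet (vis : List (List Bool)) (x y : Int) : Option Bool :=
  (PySem.List.pyGet? vis x).bind (fun r => PySem.List.pyGet? r y)

-- visited[x][y] = True; every write site has already checked 0 ≤ x and 0 ≤ y, where this is exact
def pvVisSet (vis : List (List Bool)) (x y : Int) : List (List Bool) :=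
  if 0 ≤ x ∧ 0 ≤ y then vis.set x.toNat ((vis.getD x.toNat []).set y.toNat true) else vis

-- port of the inner recursive dfs(visited, path, x, y, ans); since each Python call
-- restores visited and path on exit, they are passed by value here.  The Nat argument
-- is a structural-recursion fuel guard only (the recursion depth is bounded by the
-- number of unvisited cells, so the fuel print_all_words supplies is never exhausted).
def pvDfsA (g : List (List String)) : Nat → List (List Bool) → List String → Int → Int →
    PySem.Set String → PySem.Set String
  | 0, _, _, _, _, ans => ans          -- fuel guard; unreachable from print_all_words
  | fuel + 1, vis, path, x, y, ans =>
    let path' := path ++ [pvCell g x y]                       -- path.append(input[x][y])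
    let vis' := pvVisSet vis x y                              -- visited[x][y] = True
    let ans' := PySem.Set.add ans (PySem.Str.join "" path')   -- ans.add(''.join(path))
    pvDirs.foldl (fun a dd =>                                 -- for dx, dy in d: …
      let nx := x + dd.1
      let ny := y + dd.2
      -- 'not visited[nx][ny]' ported as 'pvVisGet vis' nx ny = some false' (exact: under
      -- Pre_ the visited matrix has the grid's shape, so after the bounds checks the lookup is a 'some')
      if 0 ≤ nx ∧ nx < (g.length : Int) ∧ 0 ≤ ny ∧ ny < ((g.headI.length : Int))
          ∧ pvVisGet vis' nx ny = some false
      then pvDfsA g fuel vis' path' nx ny a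
      else a) ans'

-- len(input), len(input[0]) are evaluated up front; under Pre_ (input nonempty, no row
-- shorter than row 0) len(input[0]) = input.headI.length and no access raises.  Python
-- reuses ONE visited matrix which every dfs call restores to all-False before returning,
-- so each top-level call receives the all-False matrix.
def print_all_words (input : List (List String)) : List String :=
  let rows : Int := input.length
  let cols : Int := input.headI.length
  let visited : List (List Bool) := List.replicate input.length (List.replicate input.headI.length false)
  (PySem.List.pyRange 0 rows 1).foldl (fun ans i =>
    (PySem.List.pyRange 0 cols 1).foldl (fun ans j =>
      pvDfsA input (input.length * input.headI.length + 1) visited [] i j ans) ans)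
    PySem.Set.empty

-- ===== PORT B =====
-- the frames pushed for one popped frame: Python appends them for reversed(d) at the
-- stack's END; with the stack's top at the list HEAD here, that is exactly consing
-- them in d order, i.e. filterMap over pvDirs itself
def pvChildren (g : List (List String)) (x y : Int) (path : String) (vis : List (List Bool)) :
    List (Int × Int × String × List (List Bool)) :=
  pvDirs.filterMap (fun dd =>
    let nx := x + dd.1
    let ny := y + dd.2
    if 0 ≤ nx ∧ nx < (g.length : Int) ∧ 0 ≤ ny ∧ ny < ((g.headI.length : Int))
        ∧ pvVisGet vis nx ny = some false
    then some (nx, ny, path ++ pvCell g nx ny, pvVisSet vis nx ny)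
    else none)

-- while stack: pop; add the frame's string; push the valid unvisited neighbors.
-- The Nat argument is a structural-recursion fuel guard only: each iteration pops one
-- frame, and the pop count is bounded by 9^(unvisited cells), so the fuel
-- print_all_words_alt supplies is never exhausted.
def pvRunB (g : List (List String)) : Nat → List (Int × Int × String × List (List Bool)) →
    PySem.Set String → PySem.Set String
  | _, [], ans => ans
  | 0, _ :: _, ans => ans              -- fuel guard; unreachable from print_all_words_alt
  | fuel + 1, (x, y, path, vis) :: rest, ans =>
      pvRunB g fuel (pvChildren g x y path vis ++ rest) (PySem.Set.add ans path)

def print_all_words_alt (input : List (List String)) : List String :=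
  let rows : Int := input.length
  let cols : Int := input.headI.length       -- len(input[0]); Pre_ gives input ≠ []
  (PySem.List.pyRange 0 rows 1).foldl (fun ans i =>
    (PySem.List.pyRange 0 cols 1).foldl (fun ans j =>
      -- visited0 all False, then visited0[i][j] = True; seed frame (i, j, input[i][j], visited0)
      pvRunB input (9 ^ (input.length * input.headI.length))
        [(i, j, pvCell input i j,
          pvVisSet (List.replicate input.length (List.replicate input.headI.length false)) i j)]
        ans) ans) PySem.Set.empty

-- ===== PRECONDITION & SPEC =====
-- Pre_ excludes exactly the inputs where A raises IndexError: the empty grid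
-- (len(input[0])) and grids with a row shorter than row 0 (input[x][y] on some start cell).
def Pre_print_all_words (input : List (List String)) : Prop :=
  input ≠ [] ∧ ∀ r ∈ input, input.headI.length ≤ r.length
instance (input : List (List String)) : Decidable (Pre_print_all_words input) := by
  unfold Pre_print_all_words; infer_instance
def pvWitness_print_all_words : List (List String) := [["a", "b"], ["c", "d"]]
def Spec_print_all_words (input : List (List String)) (out : List String) : Prop := out = print_all_words_alt input
instance (input : List (List String)) (out : List String) : Decidable (Spec_print_all_words input out) := by unfold Spec_print_all_words; infer_instance

-- ===== CLAIM (what is proved, stated in full; the proofs are below) =====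
def Claim_equal_print_all_words : Prop := ∀ (input : List (List String)), Dom_print_all_words input → Pre_print_all_words input → Spec_print_all_words input (print_all_words input)

-- ===== LEMMAS AND PROOFS =====

-- number of unvisited cells (proof-side measure)
def pvFree (vis : List (List Bool)) : Nat := (vis.map (fun r => r.count false)).sum

-- stack measure: bounds the number of pops pvRunB still performs
def pvStackMeasure (st : List (Int × Int × String × List (List Bool))) : Nat :=
  (st.map (fun f => 9 ^ pvFree f.2.2.2)).sum

theorem pvRow_set_true_count_eq (r : List Bool) (j : Nat) (h : j < r.length)
    (hf : r[j] = false) : (r.set j true).count false + 1 = r.count false := by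
  induction r generalizing j with
  | nil => simp at h
  | cons b t ih =>
    cases j with
    | zero => simp_all
    | succ j =>
      simp only [List.length_cons, Nat.succ_lt_succ_iff] at h
      simp only [List.getElem_cons_succ] at hf
      simp only [List.set_cons_succ, List.count_cons]
      have := ih j h hf
      omega

theorem pvSum_set (ns : List Nat) (i v : Nat) (h : i < ns.length) :
    (ns.set i v).sum + ns[i] = ns.sum + v := by
  induction ns generalizing i with
  | nil => simp at h
  | cons a t ih =>
    cases i with
    | zero =>
      simp only [List.set_cons_zero, List.sum_cons, List.getElem_cons_zero]
      omega
    | succ i =>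
      simp only [List.length_cons, Nat.succ_lt_succ_iff] at h
      have := ih i h
      simp only [List.set_cons_succ, List.sum_cons, List.getElem_cons_succ]
      omega

theorem pvFree_set (vis : List (List Bool)) (x y : Int) (hx : 0 ≤ x) (hy : 0 ≤ y)
    (h : pvVisGet vis x y = some false) :
    pvFree (pvVisSet vis x y) + 1 = pvFree vis := by
  unfold pvVisGet at h
  rw [PySem.List.pyGet?_of_nonneg vis hx] at h
  obtain ⟨r, hr, hry⟩ := Option.bind_eq_some_iff.mp h
  rw [PySem.List.pyGet?_of_nonneg r hy] at hry
  obtain ⟨hxlt, hrx⟩ := List.getElem?_eq_some_iff.mp hr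
  obtain ⟨hylt, hryv⟩ := List.getElem?_eq_some_iff.mp hry
  have hgetD : vis.getD x.toNat [] = r := by
    simp [List.getD_eq_getElem?_getD, List.getElem?_eq_getElem hxlt, hrx]
  unfold pvVisSet pvFree
  rw [if_pos ⟨hx, hy⟩, hgetD, List.map_set]
  have hs := pvSum_set (vis.map (fun r => r.count false)) x.toNat ((r.set y.toNat true).count false)
      (by simpa using hxlt)
  rw [List.getElem_map, hrx] at hs
  have hre := pvRow_set_true_count_eq r y.toNat hylt hryv
  omega

theorem pvChildren_measure_lt (g : List (List String)) (x y : Int) (path : String)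
    (vis : List (List Bool)) :
    pvStackMeasure (pvChildren g x y path vis) < 9 ^ pvFree vis := by
  have hmem : ∀ c ∈ pvChildren g x y path vis, pvFree c.2.2.2 + 1 = pvFree vis := by
    intro c hc
    obtain ⟨dd, _, hdd⟩ := List.mem_filterMap.mp hc
    simp only at hdd
    split at hdd
    · rename_i hcond
      cases hdd
      exact pvFree_set vis (x + dd.1) (y + dd.2) hcond.1 hcond.2.2.1 hcond.2.2.2.2
    · simp at hdd
  by_cases hnil : pvChildren g x y path vis = []
  · rw [hnil]
    simp only [pvStackMeasure, List.map_nil, List.sum_nil]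
    exact Nat.pow_pos (by omega)
  · obtain ⟨c, hc⟩ := List.exists_mem_of_ne_nil _ hnil
    have hc1 := hmem c hc
    have hfv : pvFree vis = pvFree c.2.2.2 + 1 := by omega
    set fv := pvFree c.2.2.2 with hfvdef
    have hlen : (pvChildren g x y path vis).length ≤ 8 :=
      le_trans (List.length_filterMap_le _ _) (by simp [pvDirs])
    have hmap : ((pvChildren g x y path vis).map (fun f => 9 ^ pvFree f.2.2.2))
        = (pvChildren g x y path vis).map (fun _ => 9 ^ fv) := by
      apply List.map_congr_left
      intro c' hc'
      have := hmem c' hc'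
      have h9 : pvFree c'.2.2.2 = fv := by omega
      rw [h9]
    have hsum : pvStackMeasure (pvChildren g x y path vis)
        = (pvChildren g x y path vis).length * 9 ^ fv := by
      unfold pvStackMeasure
      rw [hmap, List.map_const', List.sum_replicate, smul_eq_mul]
    rw [hsum, hfv, pow_succ]
    have h9 : 0 < 9 ^ fv := Nat.pow_pos (by omega)
    calc (pvChildren g x y path vis).length * 9 ^ fv ≤ 8 * 9 ^ fv :=
          Nat.mul_le_mul_right _ hlen
      _ < 9 ^ fv * 9 := by omega

theorem pvStackMeasure_append (a b : List (Int × Int × String × List (List Bool))) :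
    pvStackMeasure (a ++ b) = pvStackMeasure a + pvStackMeasure b := by
  simp [pvStackMeasure]

theorem pvStackMeasure_cons (f : Int × Int × String × List (List Bool))
    (st : List (Int × Int × String × List (List Bool))) :
    pvStackMeasure (f :: st) = 9 ^ pvFree f.2.2.2 + pvStackMeasure st := by
  simp [pvStackMeasure]

-- enough fuel never runs out: pvRunB is fuel-irrelevant above the stack measure
theorem pvRunB_fuel (g : List (List String)) :
    ∀ (f1 f2 : Nat) (st : List (Int × Int × String × List (List Bool)))
      (ans : PySem.Set String), pvStackMeasure st ≤ f1 → f1 ≤ f2 →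
      pvRunB g f1 st ans = pvRunB g f2 st ans := by
  intro f1
  induction f1 using Nat.strong_induction_on with
  | _ f1 IH =>
    intro f2 st ans hm h12
    match st with
    | [] => cases f1 <;> cases f2 <;> rfl
    | (x, y, path, vis) :: rest =>
      have hpos : 0 < 9 ^ pvFree vis := Nat.pow_pos (by omega)
      have hm1 : 9 ^ pvFree vis + pvStackMeasure rest ≤ f1 := by
        rw [pvStackMeasure_cons] at hm; exact hm
      cases f1 with
      | zero => exact absurd hm1 (by omega)
      | succ k =>
        cases f2 with
        | zero => exact absurd h12 (by omega)
        | succ m =>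
          show pvRunB g k _ _ = pvRunB g m _ _
          have hdec : pvStackMeasure (pvChildren g x y path vis ++ rest) ≤ k := by
            rw [pvStackMeasure_append]
            have := pvChildren_measure_lt g x y path vis
            omega
          exact IH k (by omega) m _ _ hdec (by omega)

-- ''.join over List Char with empty separator is concatenation
theorem pvCharsJoinNil (L : List (List Char)) : PySem.Chars.join [] L = L.flatten := by
  induction L with
  | nil => simp [PySem.Chars.join_nil]
  | cons p rest ih =>
    cases rest with
    | nil => simp [PySem.Chars.join_singleton]
    | cons q t =>
      rw [PySem.Chars.join_cons_cons]
      simp only [List.flatten_cons] at ih ⊢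
      rw [ih]
      simp

theorem pvJoinSnoc (l : List String) (s : String) :
    PySem.Str.join "" (l ++ [s]) = PySem.Str.join "" l ++ s := by
  rw [← String.toList_inj]
  simp [PySem.Str.toList_join, String.toList_append, pvCharsJoinNil]

theorem pvJoinSingle (s : String) : PySem.Str.join "" [s] = s := by
  rw [← String.toList_inj]
  simp [PySem.Str.toList_join]

theorem pvVisGet_replicate (rows cols : Nat) (x y : Int) (hx : 0 ≤ x) (hy : 0 ≤ y)
    (hxr : x < (rows : Int)) (hyc : y < (cols : Int)) :
    pvVisGet (List.replicate rows (List.replicate cols false)) x y = some false := by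
  unfold pvVisGet
  rw [PySem.List.pyGet?_of_nonneg _ hx]
  rw [List.getElem?_replicate_of_lt (by omega)]
  simp only [Option.bind_some]
  rw [PySem.List.pyGet?_of_nonneg _ hy]
  rw [List.getElem?_replicate_of_lt (by omega)]

theorem pvFree_replicate (rows cols : Nat) :
    pvFree (List.replicate rows (List.replicate cols false)) = rows * cols := by
  simp [pvFree, List.count_replicate_self]

-- the simulation: popping one seeded frame off the stack runs exactly one recursive dfs call
theorem pvSim (g : List (List String)) :
    ∀ (n fuelA fuelB : Nat) (vis : List (List Bool)) (x y : Int) (path : List String)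
      (rest : List (Int × Int × String × List (List Bool))) (ans : PySem.Set String),
      pvFree vis = n → n < fuelA →
      pvStackMeasure ((x, y, PySem.Str.join "" (path ++ [pvCell g x y]), pvVisSet vis x y) :: rest)
        ≤ fuelB →
      0 ≤ x → 0 ≤ y → pvVisGet vis x y = some false →
      pvRunB g fuelB
          ((x, y, PySem.Str.join "" (path ++ [pvCell g x y]), pvVisSet vis x y) :: rest) ans
        = pvRunB g fuelB rest (pvDfsA g fuelA vis path x y ans) := by
  intro n
  induction n using Nat.strong_induction_on with
  | _ n IH =>
    intro fuelA fuelB vis x y path rest ans hn hfa hfb hx hy hv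
    have hfree : pvFree (pvVisSet vis x y) + 1 = n := hn ▸ pvFree_set vis x y hx hy hv
    have hpos : 0 < 9 ^ pvFree (pvVisSet vis x y) := Nat.pow_pos (by omega)
    match fuelA, hfa with
    | fa + 1, _ =>
      match fuelB with
      | 0 =>
        exfalso
        rw [pvStackMeasure_cons] at hfb
        simp only at hfb
        omega
      | fb + 1 =>
        show pvRunB g fb _ _ = pvRunB g (fb + 1) rest _
        rw [pvDfsA]
        simp only
        set vis' := pvVisSet vis x y with hvis'
        set path' := path ++ [pvCell g x y] with hpath'
        have hμ : 9 ^ pvFree vis' + pvStackMeasure rest ≤ fb + 1 := by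
          rw [pvStackMeasure_cons] at hfb; exact hfb
        have hgo : ∀ (ds : List (Int × Int)) rest' (a : PySem.Set String),
            pvStackMeasure ((ds.filterMap (fun dd =>
                let nx := x + dd.1
                let ny := y + dd.2
                if 0 ≤ nx ∧ nx < (g.length : Int) ∧ 0 ≤ ny ∧ ny < ((g.headI.length : Int))
                    ∧ pvVisGet vis' nx ny = some false
                then some (nx, ny, PySem.Str.join "" path' ++ pvCell g nx ny, pvVisSet vis' nx ny)
                else none)) ++ rest') ≤ fb →
            pvRunB g fb ((ds.filterMap (fun dd =>
                let nx := x + dd.1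
                let ny := y + dd.2
                if 0 ≤ nx ∧ nx < (g.length : Int) ∧ 0 ≤ ny ∧ ny < ((g.headI.length : Int))
                    ∧ pvVisGet vis' nx ny = some false
                then some (nx, ny, PySem.Str.join "" path' ++ pvCell g nx ny, pvVisSet vis' nx ny)
                else none)) ++ rest') a
              = pvRunB g fb rest' (ds.foldl (fun a dd =>
                  let nx := x + dd.1
                  let ny := y + dd.2
                  if 0 ≤ nx ∧ nx < (g.length : Int) ∧ 0 ≤ ny ∧ ny < ((g.headI.length : Int))
                      ∧ pvVisGet vis' nx ny = some false
                  then pvDfsA g fa vis' path' nx ny a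
                  else a) a) := by
          intro ds
          induction ds with
          | nil => intro rest' a _; simp
          | cons dd ds ihds =>
            intro rest' a hμ'
            obtain ⟨dx, dy⟩ := dd
            simp only [List.foldl_cons]
            by_cases hc : 0 ≤ x + dx ∧ x + dx < (g.length : Int) ∧ 0 ≤ y + dy
                ∧ y + dy < ((g.headI.length : Int)) ∧ pvVisGet vis' (x + dx) (y + dy) = some false
            · rw [List.filterMap_cons_some (by exact if_pos hc)] at hμ' ⊢
              rw [if_pos hc, List.cons_append]
              rw [show PySem.Str.join "" path' ++ pvCell g (x + dx) (y + dy)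
                    = PySem.Str.join "" (path' ++ [pvCell g (x + dx) (y + dy)]) from
                  (pvJoinSnoc path' _).symm]
              rw [List.cons_append] at hμ'
              rw [IH (pvFree vis') (by omega) fa fb vis' (x + dx) (y + dy) path' _ a rfl
                  (by omega) hμ' hc.1 hc.2.2.1 hc.2.2.2.2]
              apply ihds
              rw [pvStackMeasure_cons] at hμ'
              exact le_trans (Nat.le_add_left _ _) hμ'
            · rw [List.filterMap_cons_none (by exact if_neg hc)] at hμ' ⊢
              rw [if_neg hc]
              exact ihds rest' a hμ'
        have hdecμ : pvStackMeasure (pvChildren g x y (PySem.Str.join "" path') vis' ++ rest) ≤ fb := by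
          rw [pvStackMeasure_append]
          have := pvChildren_measure_lt g x y (PySem.Str.join "" path') vis'
          omega
        show pvRunB g fb (pvChildren g x y (PySem.Str.join "" path') vis' ++ rest) _ = _
        rw [show pvChildren g x y (PySem.Str.join "" path') vis'
              = pvDirs.filterMap (fun dd =>
                  let nx := x + dd.1
                  let ny := y + dd.2
                  if 0 ≤ nx ∧ nx < (g.length : Int) ∧ 0 ≤ ny ∧ ny < ((g.headI.length : Int))
                      ∧ pvVisGet vis' nx ny = some false
                  then some (nx, ny, PySem.Str.join "" path' ++ pvCell g nx ny, pvVisSet vis' nx ny)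
                  else none) from rfl]
        rw [hgo pvDirs rest _ (by
          rw [show pvDirs.filterMap (fun dd =>
                  let nx := x + dd.1
                  let ny := y + dd.2
                  if 0 ≤ nx ∧ nx < (g.length : Int) ∧ 0 ≤ ny ∧ ny < ((g.headI.length : Int))
                      ∧ pvVisGet vis' nx ny = some false
                  then some (nx, ny, PySem.Str.join "" path' ++ pvCell g nx ny, pvVisSet vis' nx ny)
                  else none)
                = pvChildren g x y (PySem.Str.join "" path') vis' from rfl]
          exact hdecμ)]
        apply pvRunB_fuel g fb (fb + 1) rest _ (by
          rw [pvStackMeasure_cons] at hfb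
          omega) (by omega)

-- per start cell: one stack run with a seeded frame equals one dfs call
theorem pvStart (g : List (List String)) (i j : Int) (hi : 0 ≤ i) (hj : 0 ≤ j)
    (hir : i < (g.length : Int)) (hjc : j < ((g.headI.length : Int))) (ans : PySem.Set String) :
    pvRunB g (9 ^ (g.length * g.headI.length))
      [(i, j, pvCell g i j,
        pvVisSet (List.replicate g.length (List.replicate g.headI.length false)) i j)] ans
      = pvDfsA g (g.length * g.headI.length + 1)
          (List.replicate g.length (List.replicate g.headI.length false)) [] i j ans := by
  have hv := pvVisGet_replicate g.length g.headI.length i j hi hj hir hjc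
  have hrc := pvFree_replicate g.length g.headI.length
  have hset := pvFree_set (List.replicate g.length (List.replicate g.headI.length false)) i j hi hj hv
  have hμ : pvStackMeasure
      [(i, j, PySem.Str.join "" ([] ++ [pvCell g i j]),
        pvVisSet (List.replicate g.length (List.replicate g.headI.length false)) i j)]
      ≤ 9 ^ (g.length * g.headI.length) := by
    rw [pvStackMeasure_cons]
    simp only [pvStackMeasure, List.map_nil, List.sum_nil, Nat.add_zero]
    exact Nat.pow_le_pow_right (by omega) (by omega)
  have := pvSim g (g.length * g.headI.length) (g.length * g.headI.length + 1)
    (9 ^ (g.length * g.headI.length))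
    (List.replicate g.length (List.replicate g.headI.length false)) i j [] [] ans
    hrc (by omega) hμ hi hj hv
  rw [show ([] : List String) ++ [pvCell g i j] = [pvCell g i j] by simp, pvJoinSingle] at this
  rw [this]
  simp only [pvRunB]

-- ===== VERDICT (by name: the statement is the Claim_ definition above) =====
theorem print_all_words_spec : Claim_equal_print_all_words := by
  intro input _hdom _hpre
  unfold Spec_print_all_words print_all_words print_all_words_alt
  apply PySem.List.foldl_congr_mem
  intro acc i hi
  apply PySem.List.foldl_congr_mem
  intro acc2 j hj
  obtain ⟨hi0, hir⟩ := PySem.List.mem_pyRange_one.mp hi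
  obtain ⟨hj0, hjc⟩ := PySem.List.mem_pyRange_one.mp hj
  exact (pvStart input i j hi0 hj0 hir hjc acc2).symm
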